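-- pv_equiv track=rewrite | github.com/pavelb/project-euler-python | 054.py | get
-- ===== SOURCE A (Python) =====
-- def get(hand, n):
-- 	count = dict()
-- 	for number, _ in hand:
-- 		if number in count:
-- 			count[number] += 1
-- 		else:
-- 			count[number] = 1
-- 	return [(k, 0) for k, v in count.items() if v == n]
-- ===== SOURCE B (Python) =====
-- def get(hand, n):
-- 	res = []
-- 	while hand:
-- 		x = hand[0][0]
-- 		rest = [p for p in hand if p[0] != x]
-- 		if len(hand) - len(rest) == n:
-- 			res.append((x, 0))
-- 		hand = rest
-- 	return res
-- ===== Notes on version B (the rewrite author's own statement) =====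
-- stated objective: alternative
-- what changed: Replaces the build-a-frequency-dict-then-filter approach with an iterative peel-off: repeatedly take the first remaining number, remove all pairs with that number from the working list, derive its multiplicity from the length drop, and emit it if that equals n.
import Mathlib
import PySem

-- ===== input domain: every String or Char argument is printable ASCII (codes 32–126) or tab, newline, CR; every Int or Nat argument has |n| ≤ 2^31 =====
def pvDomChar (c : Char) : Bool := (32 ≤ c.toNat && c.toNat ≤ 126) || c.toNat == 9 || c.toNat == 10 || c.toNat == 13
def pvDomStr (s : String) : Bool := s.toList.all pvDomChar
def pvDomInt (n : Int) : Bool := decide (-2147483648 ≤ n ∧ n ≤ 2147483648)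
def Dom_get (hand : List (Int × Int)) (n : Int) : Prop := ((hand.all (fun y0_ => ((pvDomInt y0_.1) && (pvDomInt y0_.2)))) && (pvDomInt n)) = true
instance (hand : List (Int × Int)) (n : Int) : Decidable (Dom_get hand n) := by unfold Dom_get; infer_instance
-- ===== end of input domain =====

-- B replaces the frequency dict + post-filter with an iterative peel-off that removes all
-- occurrences of the current first number and reads its count off the length drop (alternative).

-- ===== PORT A =====
-- count = dict(); for number, _ in hand: if number in count: count[number] += 1 else: count[number] = 1
-- return [(k, 0) for k, v in count.items() if v == n]
def get (hand : List (Int × Int)) (n : Int) : List (Int × Int) :=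
  let count : PySem.Dict Int Int :=
    hand.foldl (fun count p =>
      if count.contains p.1 then count.insert p.1 (count.getD p.1 0 + 1)
      else count.insert p.1 1) PySem.Dict.empty
  (count.items.filter (fun kv => kv.2 == n)).map (fun kv => (kv.1, 0))

-- ===== PORT B =====
-- res = []
-- while hand:
--   x = hand[0][0]; rest = [p for p in hand if p[0] != x]
--   if len(hand) - len(rest) == n: res.append((x, 0))
--   hand = rest
-- return res
def getAltLoop (hand : List (Int × Int)) (n : Int) (res : List (Int × Int)) : List (Int × Int) :=
  match hand with
  | [] => res
  | p :: t =>
    getAltLoop ((p :: t).filter (fun q => q.1 != p.1)) n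
      (if (((p :: t).length : Int) - (((p :: t).filter (fun q => q.1 != p.1)).length : Int)) == n
       then res ++ [(p.1, 0)] else res)
termination_by hand.length
decreasing_by
  rw [List.filter_cons, show (p.1 != p.1) = false by simp]
  simp only [Bool.false_eq_true, if_false, List.length_cons]
  exact Nat.lt_succ_of_le (List.length_filter_le _ t)

def get_alt (hand : List (Int × Int)) (n : Int) : List (Int × Int) :=
  getAltLoop hand n []

-- ===== PRECONDITION & SPEC =====
def Spec_get (hand : List (Int × Int)) (n : Int) (out : List (Int × Int)) : Prop := out = get_alt hand n
instance (hand : List (Int × Int)) (n : Int) (out : List (Int × Int)) : Decidable (Spec_get hand n out) := by unfold Spec_get; infer_instance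

-- ===== CLAIM (what is proved, stated in full; the proofs are below) =====
def Claim_equal_get : Prop := ∀ (hand : List (Int × Int)) (n : Int), Dom_get hand n → Spec_get hand n (get hand n)

-- ===== LEMMAS AND PROOFS =====

-- canonical form of the result: first-occurrence-distinct keys whose total count is n
def canon (hand : List (Int × Int)) (n : Int) : List (Int × Int) :=
  ((PySem.Set.ofList (hand.map Prod.fst)).filter
      (fun k => ((hand.map Prod.fst).count k : Int) == n)).map (fun k => ((k : Int), (0 : Int)))

-- A's counting loop is Counter(first components)
lemma get_count_eq_counter (hand : List (Int × Int)) :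
    hand.foldl (fun (count : PySem.Dict Int Int) p =>
      if count.contains p.1 then count.insert p.1 (count.getD p.1 0 + 1)
      else count.insert p.1 1) PySem.Dict.empty
    = PySem.Dict.counter (hand.map (fun q => q.1)) := by
  rw [← PySem.Dict.foldl_insert_getD_add_one_eq_counter, List.foldl_map]
  congr 1
  funext d p
  by_cases h : d.contains p.1
  · simp [h]
  · have h2 : d.get? p.1 = none := by
      cases hg : d.get? p.1 with
      | none => rfl
      | some v => rw [PySem.Dict.contains_eq_isSome_get?, hg] at h; simp at h
    simp [h, PySem.Dict.getD, h2]

lemma get_eq_canon (hand : List (Int × Int)) (n : Int) : _root_.get hand n = canon hand n := by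
  unfold _root_.get canon
  simp only [get_count_eq_counter, PySem.Dict.items_counter, List.filter_map, List.map_map]
  rfl

-- building the set of distinct elements commutes with filtering
lemma ofList_filter (l : List Int) (p : Int → Bool) :
    PySem.Set.ofList (l.filter p) = (PySem.Set.ofList l).filter p := by
  induction l with
  | nil => rfl
  | cons a t ih =>
    by_cases hp : p a = true
    · rw [List.filter_cons, hp, if_pos rfl, PySem.Set.ofList_cons, ih, PySem.Set.ofList_cons,
        PySem.Set.discard, PySem.Set.discard, List.filter_cons, hp, if_pos rfl,
        List.filter_filter, List.filter_filter]
      congr 1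
      apply List.filter_congr
      intro y _
      exact Bool.and_comm _ _
    · have hpa : p a = false := by simpa using hp
      rw [List.filter_cons, hpa]
      simp only [Bool.false_eq_true, if_false]
      rw [ih, PySem.Set.ofList_cons, PySem.Set.discard, List.filter_cons, hpa]
      simp only [Bool.false_eq_true, if_false]
      rw [List.filter_filter]
      apply List.filter_congr
      intro y _
      by_cases hy : y = a
      · subst hy; simp [hpa]
      · simp [hy]

-- one peel-off step on the key list
lemma keyStep (x : Int) (ks : List Int) (n : Int) :
    (PySem.Set.ofList (x :: ks)).filter (fun k => (((x :: ks).count k : Int) == n))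
    = (if (((x :: ks).count x : Int) == n) then [x] else [])
      ++ ((PySem.Set.ofList ((x :: ks).filter (fun k => k != x))).filter
            (fun k => ((((x :: ks).filter (fun k' => k' != x)).count k : Int) == n))) := by
  have hxx : (x != x) = false := by simp
  simp only [List.filter_cons, hxx, Bool.false_eq_true, if_false, PySem.Set.ofList_cons]
  rw [ofList_filter]
  have htail : ∀ f g : Int → Bool,
      (∀ k, k ≠ x → f k = g k) →
      (PySem.Set.discard (PySem.Set.ofList ks) x).filter f
        = ((PySem.Set.ofList ks).filter (fun k => k != x)).filter g := by
    intro f g hfg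
    rw [show (PySem.Set.ofList ks).filter (fun k => k != x)
          = PySem.Set.discard (PySem.Set.ofList ks) x from rfl]
    apply List.filter_congr
    intro k hk
    exact hfg k (PySem.Set.mem_discard _ _ _ |>.1 hk).2
  have ht := htail (fun k => (((x :: ks).count k : Int) == n))
      (fun k => (((ks.filter (fun k' => k' != x)).count k : Int) == n))
      (by
        intro k hk
        have h1 : (ks.filter (fun k' => k' != x)).count k = ks.count k :=
          List.count_filter (by simpa using hk)
        simp [Ne.symm hk, h1])
  by_cases hc : ((((x :: ks).count x : Int)) == n) = true
  · rw [if_pos hc, if_pos hc, ht]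
    rfl
  · rw [if_neg hc, if_neg hc, List.nil_append]
    exact ht

-- removing all copies of x drops the length by exactly the count of x
lemma count_eq_length_sub (l : List Int) (x : Int) :
    (l.count x : Int) = (l.length : Int) - ((l.filter (fun k => k != x)).length : Int) := by
  induction l with
  | nil => simp
  | cons a t ih =>
    by_cases h : a = x
    · subst h
      rw [List.count_cons_self, List.filter_cons, show (a != a) = false by simp]
      simp only [Bool.false_eq_true, if_false, List.length_cons]
      push_cast
      omega
    · rw [List.count_cons_of_ne (by simpa using h), List.filter_cons,
        show (a != x) = true by simpa using h, if_pos rfl]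
      simp only [List.length_cons]
      push_cast
      omega

-- unrolling canon one distinct key at a time
lemma canon_cons (p : Int × Int) (t : List (Int × Int)) (n : Int) :
    canon (p :: t) n
      = (if ((((p :: t).length : Int) - (((p :: t).filter (fun q => q.1 != p.1)).length : Int)) == n)
         then [(p.1, (0 : Int))] else [])
        ++ canon ((p :: t).filter (fun q => q.1 != p.1)) n := by
  have hkeys : ((p :: t).filter (fun q => q.1 != p.1)).map Prod.fst
      = (p.1 :: t.map Prod.fst).filter (fun k => k != p.1) := by
    induction t with
    | nil => simp
    | cons q s ihs =>
      simp only [List.filter_cons, List.map_cons] at *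
      by_cases hq : (q.1 != p.1) = true
      · simp only [hq]
        by_cases hp : (p.1 != p.1) = true <;> simp_all
      · simp_all
  have hcount : (((p :: t).map Prod.fst).count p.1 : Int)
      = ((p :: t).length : Int) - (((p :: t).filter (fun q => q.1 != p.1)).length : Int) := by
    rw [count_eq_length_sub, List.length_map]
    have : (((p :: t).map Prod.fst).filter (fun k => k != p.1)).length
        = ((p :: t).filter (fun q => q.1 != p.1)).length := by
      rw [show (p :: t).map Prod.fst = p.1 :: t.map Prod.fst from rfl, ← hkeys, List.length_map]
    rw [this]
  simp only [canon, List.map_cons]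
  rw [keyStep, ← hkeys, List.map_append]
  congr 1
  rw [apply_ite (List.map (fun k => ((k : Int), (0 : Int))))]
  rw [show ((p.1 :: List.map Prod.fst t).count p.1 : Int)
        = (((p :: t).map Prod.fst).count p.1 : Int) from rfl, hcount]
  split <;> rfl

-- B's loop accumulates canon
lemma getAltLoop_eq (k : Nat) : ∀ (hand : List (Int × Int)) (n : Int) (res : List (Int × Int)),
    hand.length ≤ k → getAltLoop hand n res = res ++ canon hand n := by
  induction k with
  | zero =>
    intro hand n res h
    have : hand = [] := List.eq_nil_of_length_eq_zero (Nat.le_zero.1 h)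
    subst this
    rw [getAltLoop]
    simp [canon]
  | succ k ih =>
    intro hand n res h
    cases hand with
    | nil =>
      rw [getAltLoop]
      simp [canon]
    | cons p t =>
      rw [getAltLoop]
      have hrest : ((p :: t).filter (fun q => q.1 != p.1)).length ≤ k := by
        rw [List.filter_cons, show (p.1 != p.1) = false by simp]
        simp only [Bool.false_eq_true, if_false]
        exact le_trans (List.length_filter_le _ t) (Nat.succ_le_succ_iff.1 h)
      rw [ih _ n _ hrest, canon_cons]
      by_cases hc : ((((p :: t).length : Int) - (((p :: t).filter (fun q => q.1 != p.1)).length : Int)) == n) = true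
      · rw [if_pos hc, if_pos hc, List.append_assoc]
      · rw [if_neg hc, if_neg hc, List.nil_append]

-- ===== VERDICT (by name: the statement is the Claim_ definition above) =====
theorem get_spec : Claim_equal_get := by
  intro hand n _
  unfold Spec_get
  show _root_.get hand n = get_alt hand n
  rw [get_eq_canon, get_alt, getAltLoop_eq hand.length hand n [] (le_refl _), List.nil_append]
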